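-- pv_equiv track=rewrite | github.com/asweigart/programmedpatterns | book/visualpatterns.py | formula65
-- ===== SOURCE A (Python) =====
-- def formula65(step):
--     width = 1
--     height = 1
--     for i in range(2, step + 1):
--         if i % 3 == 0:
--             width += 3
--             height += 2
--         elif i % 3 == 1:
--             width -= 1
--             height -= 1
--     return width * height
-- ===== SOURCE B (Python) =====
-- def formula65(step):
--     if step < 2:
--         return 1
--     c0 = step // 3            # count of i in [2, step] with i % 3 == 0
--     c1 = (step + 2) // 3 - 1  # count of i in [2, step] with i % 3 == 1
--     return (1 + 3 * c0 - c1) * (1 + 2 * c0 - c1)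
-- ===== Notes on version B (the rewrite author's own statement) =====
-- stated objective: faster
-- what changed: Replaces the O(step) loop over range(2, step+1) by O(1) closed-form counts of i%3==0 and i%3==1 in [2, step], then evaluates width*height directly.
import Mathlib
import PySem

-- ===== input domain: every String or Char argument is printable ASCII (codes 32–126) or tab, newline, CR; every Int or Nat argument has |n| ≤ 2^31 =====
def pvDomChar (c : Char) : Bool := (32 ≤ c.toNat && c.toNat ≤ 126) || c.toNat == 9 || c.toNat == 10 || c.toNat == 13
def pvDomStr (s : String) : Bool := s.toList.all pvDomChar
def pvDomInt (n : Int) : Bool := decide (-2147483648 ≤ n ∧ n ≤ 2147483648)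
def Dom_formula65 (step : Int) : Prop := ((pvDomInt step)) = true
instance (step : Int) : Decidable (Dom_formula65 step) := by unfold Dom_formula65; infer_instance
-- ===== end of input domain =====

-- B replaces the O(step) loop by O(1) closed-form counts of i%3==0 and i%3==1 over [2, step].

-- ===== PORT A =====
def formula65 (step : Int) : Int :=
  let wh := (PySem.List.pyRange 2 (step + 1) 1).foldl
    (fun (wh : Int × Int) (i : Int) =>
      if PySem.Int.mod i 3 = 0 then (wh.1 + 3, wh.2 + 2)
      else if PySem.Int.mod i 3 = 1 then (wh.1 - 1, wh.2 - 1)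
      else wh)
    (1, 1)
  wh.1 * wh.2

-- ===== PORT B =====
def formula65_alt (step : Int) : Int :=
  if step < 2 then 1
  else
    let c0 := PySem.Int.floordiv step 3
    let c1 := PySem.Int.floordiv (step + 2) 3 - 1
    (1 + 3 * c0 - c1) * (1 + 2 * c0 - c1)

-- ===== PRECONDITION & SPEC =====
def Spec_formula65 (step : Int) (out : Int) : Prop := out = formula65_alt step
instance (step : Int) (out : Int) : Decidable (Spec_formula65 step out) := by unfold Spec_formula65; infer_instance

-- ===== CLAIM (what is proved, stated in full; the proofs are below) =====
def Claim_equal_formula65 : Prop := ∀ (step : Int), Dom_formula65 step → Spec_formula65 step (formula65 step)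

-- ===== LEMMAS AND PROOFS =====

def pvBody (wh : Int × Int) (i : Int) : Int × Int :=
  if PySem.Int.mod i 3 = 0 then (wh.1 + 3, wh.2 + 2)
  else if PySem.Int.mod i 3 = 1 then (wh.1 - 1, wh.2 - 1)
  else wh

-- loop invariant: after processing i = 2 .. n (n ≥ 1), state is the closed form
theorem pvLoop (m : Nat) :
    (PySem.List.pyRange 2 (2 + (m : Int)) 1).foldl pvBody (1, 1) =
      (1 + 3 * ((1 + (m : Int)) / 3) - ((3 + (m : Int)) / 3 - 1),
       1 + 2 * ((1 + (m : Int)) / 3) - ((3 + (m : Int)) / 3 - 1)) := by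
  induction m with
  | zero => simp
  | succ k ih =>
    have hsplit : PySem.List.pyRange 2 (2 + ((k : Int) + 1)) 1 =
        PySem.List.pyRange 2 (2 + (k : Int)) 1 ++ [2 + (k : Int)] := by
      have := PySem.List.pyRange_one_succ_right (a := 2) (b := 2 + (k : Int)) (by omega)
      simpa [add_assoc] using this
    push_cast
    rw [hsplit, List.foldl_append, ih]
    have hmod : PySem.Int.mod (2 + (k : Int)) 3 = (2 + (k : Int)) % 3 :=
      PySem.Int.mod_eq_emod_of_pos (by omega)
    simp only [List.foldl_cons, List.foldl_nil, pvBody, hmod]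
    have h3 : ((2 : Int) + k) % 3 = 0 ∨ ((2 : Int) + k) % 3 = 1 ∨ ((2 : Int) + k) % 3 = 2 := by
      omega
    rcases h3 with h | h | h <;> simp [h] <;> constructor <;> omega

theorem pvFold (step : Int) (h : 1 ≤ step) :
    (PySem.List.pyRange 2 (step + 1) 1).foldl pvBody (1, 1) =
      (1 + 3 * (step / 3) - ((step + 2) / 3 - 1),
       1 + 2 * (step / 3) - ((step + 2) / 3 - 1)) := by
  obtain ⟨m, hm⟩ : ∃ m : Nat, step = 1 + (m : Int) :=
    ⟨(step - 1).toNat, by omega⟩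
  subst hm
  have := pvLoop m
  rw [show (1 : Int) + m + 1 = 2 + (m : Int) by ring]
  rw [this]
  norm_num [add_comm]
  omega

-- ===== VERDICT (by name: the statement is the Claim_ definition above) =====
theorem formula65_spec : Claim_equal_formula65 := by
  intro step _
  unfold Spec_formula65 formula65 formula65_alt
  by_cases h : step < 2
  · rw [PySem.List.pyRange_one_eq_nil (by omega)]
    simp [h]
  · push Not at h
    have hb : (PySem.List.pyRange 2 (step + 1) 1).foldl
        (fun (wh : Int × Int) (i : Int) =>
          if PySem.Int.mod i 3 = 0 then (wh.1 + 3, wh.2 + 2)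
          else if PySem.Int.mod i 3 = 1 then (wh.1 - 1, wh.2 - 1)
          else wh) (1, 1) =
        (PySem.List.pyRange 2 (step + 1) 1).foldl pvBody (1, 1) := rfl
    rw [hb, pvFold step (by omega)]
    simp [not_lt.mpr h]
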